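-- pv_equiv track=rewrite | github.com/wyunc/ADGFuzz | static/tree_parse.py | remove_circular_dependencies
-- ===== SOURCE A (Python) =====
-- def remove_circular_dependencies(function_assignments):
--     # pre-delete circular_edge
--     new_function_assignments = {}
--     for func_name, assignments in function_assignments.items():
--
--         passed_name = set()
--         new_assignments = []
--
--         for assignment in assignments:
--             var = assignment[0]
--             dependencies = assignment[1]
--             passed_name.add(var)
--             updated_dependencies = [dep for dep in dependencies if dep not in passed_name]
--             new_assignments.append((var, updated_dependencies))
--             #passed_name.add(var) #bug: self-ref, e.g. const auto &ahrs = AP::ahrs(); done: adjust this line's location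
--
--         # for var, dependencies in assignments.items():
--         #
--         #     updated_dependencies = [dep for dep in dependencies if dep not in passed_name]
--         #     new_assignments[var] = updated_dependencies
--         #     passed_name.add(var)
--
--         new_function_assignments[func_name] = new_assignments
--
--     return new_function_assignments
-- ===== SOURCE B (Python) =====
-- def remove_circular_dependencies(function_assignments):
--     new_function_assignments = {}
--     for func_name, assignments in function_assignments.items():
--         first = {}
--         for i, (var, _deps) in enumerate(assignments):
--             if var not in first:
--                 first[var] = i
--         n = len(assignments)
--         new_function_assignments[func_name] = [
--             (var, [dep for dep in deps if first.get(dep, n) > i])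
--             for i, (var, deps) in enumerate(assignments)
--         ]
--     return new_function_assignments
-- ===== Notes on version B (the rewrite author's own statement) =====
-- stated objective: alternative
-- what changed: Replaces the incrementally grown passed-name set with a precomputed first-occurrence index table per function; dependencies are kept by comparing their first-occurrence index against the current position in an enumerate pass.
import Mathlib
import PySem

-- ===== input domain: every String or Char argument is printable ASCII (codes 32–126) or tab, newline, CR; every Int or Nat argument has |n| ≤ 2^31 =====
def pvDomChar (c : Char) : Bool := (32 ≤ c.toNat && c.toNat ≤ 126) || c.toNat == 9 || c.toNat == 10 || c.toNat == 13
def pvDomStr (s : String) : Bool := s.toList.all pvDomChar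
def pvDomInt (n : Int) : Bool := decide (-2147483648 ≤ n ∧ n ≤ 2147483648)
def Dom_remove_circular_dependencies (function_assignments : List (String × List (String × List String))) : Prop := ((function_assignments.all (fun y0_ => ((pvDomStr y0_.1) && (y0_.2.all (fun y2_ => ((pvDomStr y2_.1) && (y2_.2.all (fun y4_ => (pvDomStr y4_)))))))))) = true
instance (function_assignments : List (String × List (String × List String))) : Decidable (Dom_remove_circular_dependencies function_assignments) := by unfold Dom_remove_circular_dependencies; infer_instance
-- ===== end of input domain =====

-- B replaces A's incrementally grown passed-name set with a per-function first-occurrence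
-- index table and index comparisons (objective: alternative; same cost, different shape).

-- ===== PORT A =====
-- inner loop of A over one function's assignment list: grows passed_name, appends filtered pairs
def pvInnerA (assignments : List (String × List String)) : List (String × List String) :=
  (assignments.foldl
    (fun (st : PySem.Set String × List (String × List String)) assignment =>
      let var := assignment.1
      let dependencies := assignment.2
      let passed := PySem.Set.add st.1 var
      (passed, st.2 ++ [(var, dependencies.filter (fun dep => !(PySem.Set.contains passed dep)))]))
    (PySem.Set.empty, [])).2

def remove_circular_dependencies (function_assignments : List (String × List (String × List String))) : List (String × List (String × List String)) :=
  ((PySem.Dict.ofList function_assignments).items.foldl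
    (fun (nd : PySem.Dict String (List (String × List String))) p => nd.insert p.1 (pvInnerA p.2))
    PySem.Dict.empty).items

-- ===== PORT B =====
-- first-occurrence index of each variable in one function's assignment list
def pvFirstIdx (assignments : List (String × List String)) : PySem.Dict String Int :=
  (PySem.List.enumerate assignments).foldl
    (fun f p => if f.contains p.2.1 then f else f.insert p.2.1 p.1)
    PySem.Dict.empty

-- inner pass of B: keep a dependency iff its first-occurrence index is past the current one
def pvInnerB (assignments : List (String × List String)) : List (String × List String) :=
  let first := pvFirstIdx assignments
  let n : Int := assignments.length
  (PySem.List.enumerate assignments).map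
    (fun p => (p.2.1, p.2.2.filter (fun dep => first.getD dep n > p.1)))

def remove_circular_dependencies_alt (function_assignments : List (String × List (String × List String))) : List (String × List (String × List String)) :=
  ((PySem.Dict.ofList function_assignments).items.foldl
    (fun (nd : PySem.Dict String (List (String × List String))) p => nd.insert p.1 (pvInnerB p.2))
    PySem.Dict.empty).items

-- ===== PRECONDITION & SPEC =====
def Spec_remove_circular_dependencies (function_assignments : List (String × List (String × List String))) (out : List (String × List (String × List String))) : Prop := out = remove_circular_dependencies_alt function_assignments
instance (function_assignments : List (String × List (String × List String))) (out : List (String × List (String × List String))) : Decidable (Spec_remove_circular_dependencies function_assignments out) := by unfold Spec_remove_circular_dependencies; infer_instance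

-- ===== CLAIM (what is proved, stated in full; the proofs are below) =====
def Claim_equal_remove_circular_dependencies : Prop := ∀ (function_assignments : List (String × List (String × List String))), Dom_remove_circular_dependencies function_assignments → Spec_remove_circular_dependencies function_assignments (remove_circular_dependencies function_assignments)

-- ===== LEMMAS AND PROOFS =====

-- reference recursion both inner passes are reduced to
def pvRef (s : PySem.Set String) : List (String × List String) → List (String × List String)
  | [] => []
  | a :: rest =>
      let s' := PySem.Set.add s a.1
      (a.1, a.2.filter (fun dep => !(PySem.Set.contains s' dep))) :: pvRef s' rest

-- first-occurrence index (Nat-valued, proof-side)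
def pvFidx (v : String) : List String → Option Nat
  | [] => none
  | x :: xs => if x = v then some 0 else (pvFidx v xs).map (· + 1)

theorem pvInnerA_foldl (l : List (String × List String)) (s : PySem.Set String)
    (acc : List (String × List String)) :
    (l.foldl
      (fun (st : PySem.Set String × List (String × List String)) assignment =>
        let var := assignment.1
        let dependencies := assignment.2
        let passed := PySem.Set.add st.1 var
        (passed, st.2 ++ [(var, dependencies.filter (fun dep => !(PySem.Set.contains passed dep)))]))
      (s, acc)).2 = acc ++ pvRef s l := by
  induction l generalizing s acc with
  | nil => simp [pvRef]
  | cons a rest ih =>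
      rw [List.foldl_cons]
      exact (ih (PySem.Set.add s a.1)
        (acc ++ [(a.1, a.2.filter (fun dep => !(PySem.Set.contains (PySem.Set.add s a.1) dep)))])).trans
        (by simp [pvRef])

theorem pvInnerA_eq_ref (l : List (String × List String)) :
    pvInnerA l = pvRef PySem.Set.empty l := by
  unfold pvInnerA
  simpa using pvInnerA_foldl l PySem.Set.empty []

theorem pvFirstIdx_aux_get? (l : List (String × List String)) (s : Int)
    (d0 : PySem.Dict String Int) (v : String) :
    ((PySem.List.enumerate l s).foldl
      (fun f p => if f.contains p.2.1 then f else f.insert p.2.1 p.1) d0).get? v =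
    if d0.contains v then d0.get? v
    else (pvFidx v (l.map Prod.fst)).map (fun j => s + j) := by
  induction l generalizing s d0 with
  | nil =>
      simp only [PySem.List.enumerate_nil, List.foldl_nil]
      split_ifs with h
      · rfl
      · exact (PySem.Dict.get?_eq_none_iff_contains d0 v).mpr (by simp [h])
  | cons a rest ih =>
      rw [PySem.List.enumerate_cons, List.foldl_cons, ih]
      by_cases hc : d0.contains a.1
      · rw [if_pos hc]
        by_cases hv : a.1 = v
        · subst hv; simp [hc]
        · rw [List.map_cons]
          simp only [pvFidx, hv, if_false]
          by_cases hv0 : d0.contains v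
          · simp [hv0]
          · simp only [hv0]
            cases pvFidx v (rest.map Prod.fst) with
            | none => simp
            | some j => simp only [Option.map_some]; simp; ring
      · rw [if_neg hc]
        by_cases hv : a.1 = v
        · subst hv
          simp [PySem.Dict.get?_insert_self, pvFidx, hc]
        · rw [PySem.Dict.contains_insert, PySem.Dict.get?_insert_of_ne _ _ (Ne.symm hv)]
          have hbe : (v == a.1) = false := by simp [Ne.symm hv]
          rw [List.map_cons]
          simp only [pvFidx, hv, if_false, hbe, Bool.false_or]
          by_cases hv0 : d0.contains v
          · simp [hv0]
          · simp only [hv0]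
            cases pvFidx v (rest.map Prod.fst) with
            | none => simp
            | some j => simp only [Option.map_some]; simp; ring

theorem pvFirstIdx_get? (l : List (String × List String)) (v : String) :
    (pvFirstIdx l).get? v = (pvFidx v (l.map Prod.fst)).map (fun j => (j : Int)) := by
  rw [pvFirstIdx, pvFirstIdx_aux_get? l 0 PySem.Dict.empty v]
  simp

theorem pvFidx_mem_take (v : String) (xs : List String) (k : Nat) :
    v ∈ xs.take (k + 1) ↔ ∃ j, pvFidx v xs = some j ∧ j ≤ k := by
  induction xs generalizing k with
  | nil => simp [pvFidx]
  | cons x rest ih =>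
      by_cases hv : x = v
      · subst hv; simp [pvFidx]
      · simp only [List.take_succ_cons, List.mem_cons, pvFidx, hv, if_false]
        constructor
        · rintro (h | h)
          · exact absurd h.symm hv
          · cases k with
            | zero => simp [List.take_zero] at h
            | succ k' =>
                obtain ⟨j, hj, hjk⟩ := (ih k').1 h
                exact ⟨j + 1, by simp [hj], by omega⟩
        · rintro ⟨j, hj, hjk⟩
          cases hfx : pvFidx v rest with
          | none => simp [hfx] at hj
          | some j0 =>
              simp only [hfx, Option.map_some] at hj
              cases hj
              cases k with
              | zero => omega
              | succ k' => exact Or.inr ((ih k').2 ⟨j0, hfx, by omega⟩)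

-- the filter predicates agree at position k
theorem pvPred_eq (l : List (String × List String)) (k : Nat) (hk : k < l.length) (dep : String) :
    (decide ((pvFirstIdx l).getD dep (l.length : Int) > (k : Int)))
      = !(PySem.Set.contains (PySem.Set.ofList ((l.take (k + 1)).map Prod.fst)) dep) := by
  have hmem : dep ∈ (l.take (k + 1)).map Prod.fst ↔
      ∃ j, pvFidx dep (l.map Prod.fst) = some j ∧ j ≤ k := by
    rw [List.map_take]
    exact pvFidx_mem_take dep (l.map Prod.fst) k
  rw [PySem.Dict.getD_eq_get?_getD, pvFirstIdx_get? l dep]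
  cases hfx : pvFidx dep (l.map Prod.fst) with
  | none =>
      have hm : dep ∉ (l.take (k + 1)).map Prod.fst := by
        rw [hmem]; rintro ⟨j, hj, -⟩; simp [hfx] at hj
      have hcon : PySem.Set.contains (PySem.Set.ofList ((l.take (k + 1)).map Prod.fst)) dep = false := by
        rw [← Bool.not_eq_true]
        simp only [PySem.Set.contains_iff, PySem.Set.mem_ofList]; exact hm
      rw [hcon]
      simp
      omega
  | some j =>
      by_cases hj : j ≤ k
      · have hm : dep ∈ (l.take (k + 1)).map Prod.fst := hmem.2 ⟨j, hfx, hj⟩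
        have hcon : PySem.Set.contains (PySem.Set.ofList ((l.take (k + 1)).map Prod.fst)) dep = true := by
          simp only [PySem.Set.contains_iff, PySem.Set.mem_ofList]; exact hm
        rw [hcon]
        simp
        omega
      · have hm : dep ∉ (l.take (k + 1)).map Prod.fst := by
          rw [hmem]; rintro ⟨j', hj', hj'k⟩; rw [hfx] at hj'; cases hj'; omega
        have hcon : PySem.Set.contains (PySem.Set.ofList ((l.take (k + 1)).map Prod.fst)) dep = false := by
          rw [← Bool.not_eq_true]
          simp only [PySem.Set.contains_iff, PySem.Set.mem_ofList]; exact hm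
        rw [hcon]
        simp
        omega

theorem pvInnerB_drop (l : List (String × List String)) (k : Nat) (hk : k ≤ l.length) :
    (PySem.List.enumerate (l.drop k) (k : Int)).map
      (fun p => (p.2.1, p.2.2.filter (fun dep => (pvFirstIdx l).getD dep (l.length : Int) > p.1)))
    = pvRef (PySem.Set.ofList ((l.take k).map Prod.fst)) (l.drop k) := by
  cases hdrop : l.drop k with
  | nil => simp [PySem.List.enumerate_nil, pvRef]
  | cons a rest =>
      have hkl : k < l.length := by
        by_contra h
        have hnil : l.drop k = [] := List.drop_eq_nil_of_le (by omega)
        rw [hnil] at hdrop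
        exact absurd hdrop (by simp)
      have hget : l[k] = a := by
        have h0 : (l.drop k)[0]'(by simp [hdrop]) = a := by simp [hdrop]
        simpa using h0
      have htake : l.take (k + 1) = l.take k ++ [a] := by
        rw [List.take_add_one, List.getElem?_eq_getElem hkl, hget]; rfl
      have hrest : l.drop (k + 1) = rest := by
        have := congrArg (List.drop 1) hdrop
        simpa [List.drop_drop, Nat.add_comm] using this
      rw [PySem.List.enumerate_cons, List.map_cons, pvRef]
      have hset : PySem.Set.add (PySem.Set.ofList ((l.take k).map Prod.fst)) a.1
          = PySem.Set.ofList ((l.take (k + 1)).map Prod.fst) := by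
        rw [htake, List.map_append, List.map_cons, List.map_nil,
          PySem.Set.ofList_append_singleton]
      have hfilter : a.2.filter (fun dep => (pvFirstIdx l).getD dep (l.length : Int) > (k : Int))
          = a.2.filter (fun dep =>
              !(PySem.Set.contains (PySem.Set.ofList ((l.take (k + 1)).map Prod.fst)) dep)) := by
        apply List.filter_congr
        intro dep _
        exact pvPred_eq l k hkl dep
      have ih := pvInnerB_drop l (k + 1) (by omega)
      rw [hrest] at ih
      have hcast : ((k : Int) + 1) = ((k + 1 : Nat) : Int) := by push_cast; ring
      simp only [hset, hfilter, hcast, ih]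
  termination_by l.length - k

theorem pvInnerB_eq_ref (l : List (String × List String)) :
    pvInnerB l = pvRef PySem.Set.empty l := by
  have := pvInnerB_drop l 0 (by omega)
  simpa [pvInnerB] using this

theorem pvInner_eq : pvInnerA = pvInnerB := by
  funext l
  rw [pvInnerA_eq_ref, pvInnerB_eq_ref]

-- ===== VERDICT (by name: the statement is the Claim_ definition above) =====
theorem remove_circular_dependencies_spec : Claim_equal_remove_circular_dependencies := by
  intro fa _
  unfold Spec_remove_circular_dependencies remove_circular_dependencies remove_circular_dependencies_alt
  rw [pvInner_eq]
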